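-- pv_equiv track=rewrite | github.com/gaba1111/teszt | roomsome1.py | calculate_guest_counts
-- ===== SOURCE A (Python) =====
-- def calculate_guest_counts(adults, children_ages, age_limit):
--     adult_count = adults
--     child_count = 0
--     for age in children_ages:
--         if age <= age_limit:
--             child_count += 1
--         else:
--             adult_count += 1
--     return adult_count, child_count
-- ===== SOURCE B (Python) =====
-- def calculate_guest_counts(adults, children_ages, age_limit):
--     ages = sorted(children_ages)
--     child_count = 0
--     for age in ages:
--         if age > age_limit:
--             break
--         child_count += 1
--     return adults + len(ages) - child_count, child_count
-- ===== Notes on version B (the rewrite author's own statement) =====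
-- stated objective: alternative
-- what changed: B sorts the ages and counts the prefix of the sorted list that is <= age_limit, stopping at the first larger element, then derives the adult total arithmetically (adults + len - child_count) instead of A's single pass with two branch counters.
import Mathlib
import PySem

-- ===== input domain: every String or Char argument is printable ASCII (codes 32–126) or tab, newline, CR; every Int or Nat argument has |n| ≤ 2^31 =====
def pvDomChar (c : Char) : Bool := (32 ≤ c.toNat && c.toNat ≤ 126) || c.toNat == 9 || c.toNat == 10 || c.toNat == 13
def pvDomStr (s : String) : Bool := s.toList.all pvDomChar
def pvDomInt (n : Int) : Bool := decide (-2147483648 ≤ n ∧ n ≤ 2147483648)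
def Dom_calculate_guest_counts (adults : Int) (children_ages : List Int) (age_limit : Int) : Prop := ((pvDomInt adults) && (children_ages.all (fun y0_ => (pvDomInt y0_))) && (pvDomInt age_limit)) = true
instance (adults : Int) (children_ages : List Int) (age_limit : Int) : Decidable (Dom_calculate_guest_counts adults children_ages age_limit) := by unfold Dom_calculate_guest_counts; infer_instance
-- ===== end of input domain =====

-- B (alternative): sorts the ages and counts the ≤-limit prefix of the sorted list (stopping at the first larger element), deriving the adult total arithmetically; return value equal to A's two-counter pass.


-- ===== PORT A =====
def calculate_guest_counts (adults : Int) (children_ages : List Int) (age_limit : Int) : Int × Int :=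
  -- single pass, two accumulators, branch order as in A
  let st := children_ages.foldl
    (fun (st : Int × Int) age =>
      if age ≤ age_limit then (st.1, st.2 + 1) else (st.1 + 1, st.2))
    (adults, 0)
  (st.1, st.2)

-- ===== PORT B =====
-- the scan loop of Source B: count from the front, stop at the first age > age_limit (the 'break')
def cgcScan (age_limit : Int) (c : Int) : List Int → Int
  | [] => c
  | age :: rest => if age > age_limit then c else cgcScan age_limit (c + 1) rest

def calculate_guest_counts_alt (adults : Int) (children_ages : List Int) (age_limit : Int) : Int × Int :=
  let ages := PySem.List.sorted children_ages (fun x => x) false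
  let child_count := cgcScan age_limit 0 ages
  (adults + (ages.length : Int) - child_count, child_count)

-- ===== PRECONDITION & SPEC =====
def Spec_calculate_guest_counts (adults : Int) (children_ages : List Int) (age_limit : Int) (out : Int × Int) : Prop := out = calculate_guest_counts_alt adults children_ages age_limit
instance (adults : Int) (children_ages : List Int) (age_limit : Int) (out : Int × Int) : Decidable (Spec_calculate_guest_counts adults children_ages age_limit out) := by unfold Spec_calculate_guest_counts; infer_instance

-- ===== CLAIM (what is proved, stated in full; the proofs are below) =====
def Claim_equal_calculate_guest_counts : Prop := ∀ (adults : Int) (children_ages : List Int) (age_limit : Int), Dom_calculate_guest_counts adults children_ages age_limit → Spec_calculate_guest_counts adults children_ages age_limit (calculate_guest_counts adults children_ages age_limit)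

-- ===== LEMMAS AND PROOFS =====

-- ===== VERDICT (by name: the statement is the Claim_ definition above) =====
-- A's loop computes (adults + len - #(≤ limit), #(≤ limit))
theorem cgc_loop (l : List Int) (age_limit a c : Int) :
    (a + (l.length : Int) - ((l.filter (fun age => age ≤ age_limit)).length : Int),
     c + ((l.filter (fun age => age ≤ age_limit)).length : Int)) =
    l.foldl (fun (st : Int × Int) age =>
      if age ≤ age_limit then (st.1, st.2 + 1) else (st.1 + 1, st.2)) (a, c) := by
  induction l generalizing a c with
  | nil => simp only [List.foldl_nil, List.filter_nil, List.length_nil]; norm_num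
  | cons x xs ih =>
    simp only [List.foldl_cons, List.filter_cons]
    by_cases h : x ≤ age_limit
    · rw [if_pos h, ← ih a (c + 1)]
      simp only [h, decide_true, if_true, Prod.mk.injEq]
      rw [List.length_cons, List.length_cons]
      push_cast
      omega
    · rw [if_neg h, ← ih (a + 1) c]
      simp only [h, decide_false, Prod.mk.injEq]
      rw [List.length_cons]
      push_cast
      omega

-- on an ascending list, the break-scan counts exactly the elements ≤ limit
theorem cgcScan_sorted (age_limit : Int) (l : List Int) (hs : l.Pairwise (· ≤ ·)) (c : Int) :
    cgcScan age_limit c l = c + ((l.filter (fun age => age ≤ age_limit)).length : Int) := by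
  induction l generalizing c with
  | nil => simp [cgcScan]
  | cons x xs ih =>
    rcases List.pairwise_cons.mp hs with ⟨hx, hxs⟩
    by_cases h : x > age_limit
    · have hfilt : xs.filter (fun age => decide (age ≤ age_limit)) = [] := by
        apply List.filter_eq_nil_iff.mpr
        intro b hb
        simp only [decide_eq_true_eq]
        exact fun hle => absurd (le_trans (hx b hb) hle) (not_le.mpr h)
      simp [cgcScan, h, List.filter_cons, not_le.mpr h, hfilt]
    · rw [show cgcScan age_limit c (x :: xs) = cgcScan age_limit (c + 1) xs from by
        simp [cgcScan, h]]
      rw [ih hxs]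
      simp only [List.filter_cons, not_lt.mp h, decide_true]
      push_cast [List.length_cons]
      omega

theorem calculate_guest_counts_spec : Claim_equal_calculate_guest_counts := by
  intro adults children_ages age_limit _
  unfold Spec_calculate_guest_counts
  unfold calculate_guest_counts calculate_guest_counts_alt
  simp only []
  rw [← cgc_loop children_ages age_limit adults 0]
  have hperm : (PySem.List.sorted children_ages (fun x => x) false).Perm children_ages :=
    PySem.List.sorted_perm _ _ _
  have hpair : (PySem.List.sorted children_ages (fun x => x) false).Pairwise (· ≤ ·) := by
    simpa using PySem.List.sorted_pairwise (xs := children_ages) (key := fun x => x)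
  rw [cgcScan_sorted age_limit _ hpair 0]
  have hlen : (PySem.List.sorted children_ages (fun x => x) false).length = children_ages.length :=
    hperm.length_eq
  have hflen : ((PySem.List.sorted children_ages (fun x => x) false).filter
      (fun age => age ≤ age_limit)).length =
      (children_ages.filter (fun age => age ≤ age_limit)).length :=
    (hperm.filter _).length_eq
  simp only [hlen, hflen]
  norm_num
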